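-- pv_equiv track=rewrite | github.com/kyuwon-shim-ARL/TLDR-Conf | graph_rag_analysis_748_v2.py | categorize_communities
-- ===== SOURCE A (Python) =====
-- from typing import Dict, List, Any, Optional, Tuple, Set
--
-- def categorize_communities(
--     communities: List[Dict],
--     major_threshold: int = 10,
--     emerging_threshold: int = 5,
--     niche_threshold: int = 3
-- ) -> Dict[str, List[Dict]]:
--     """
--     Categorize communities by size and coherence.
--
--     Categories (optimized for maximum coverage):
--     - major: >= 10 papers (main research themes)
--     - emerging: 5-9 papers (distinct emerging topics)
--     - niche: 3-4 papers (specialized areas, included in OVERVIEW)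
--     - noise: < 3 papers (isolated papers, ~18% unavoidable fragmentation)
--
--     Note: The research landscape analysis reveals ~18% of papers are in
--     singleton/doubleton communities due to entity fragmentation. This is
--     expected in diverse, interdisciplinary research collections.
--     """
--     categories = {
--         "major": [],
--         "emerging": [],
--         "niche": [],
--         "noise": []
--     }
--
--     for comm in communities:
--         paper_count = comm.get("paper_count", 0)
--
--         if paper_count >= major_threshold:  # >= 10
--             categories["major"].append(comm)
--         elif paper_count >= emerging_threshold:  # 5-9
--             categories["emerging"].append(comm)
--         elif paper_count >= niche_threshold:  # 3-4
--             categories["niche"].append(comm)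
--         else:  # 1-2 papers (isolated)
--             categories["noise"].append(comm)
--
--     # Sort each category by paper count
--     for cat in categories:
--         categories[cat].sort(key=lambda x: x["paper_count"], reverse=True)
--
--     return categories
-- ===== SOURCE B (Python) =====
-- def categorize_communities(
--     communities,
--     major_threshold=10,
--     emerging_threshold=5,
--     niche_threshold=3
-- ):
--     # Sort once globally (stable, descending by paper_count); a single pass
--     # over the ordered list then fills the four buckets already sorted.
--     ordered = sorted(communities, key=lambda x: x["paper_count"], reverse=True)
--     major, emerging, niche, noise = [], [], [], []
--     for comm in ordered:
--         pc = comm.get("paper_count", 0)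
--         if pc >= major_threshold:
--             major.append(comm)
--         elif pc >= emerging_threshold:
--             emerging.append(comm)
--         elif pc >= niche_threshold:
--             niche.append(comm)
--         else:
--             noise.append(comm)
--     return {"major": major, "emerging": emerging, "niche": niche, "noise": noise}
-- ===== Notes on version B (the rewrite author's own statement) =====
-- stated objective: alternative
-- what changed: B sorts the whole list once (stable, descending by paper_count) and then fills the four buckets in a single pass, instead of A's bucket-first loop followed by a separate sort of each of the four buckets; stability makes the per-bucket orders identical.
import Mathlib
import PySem

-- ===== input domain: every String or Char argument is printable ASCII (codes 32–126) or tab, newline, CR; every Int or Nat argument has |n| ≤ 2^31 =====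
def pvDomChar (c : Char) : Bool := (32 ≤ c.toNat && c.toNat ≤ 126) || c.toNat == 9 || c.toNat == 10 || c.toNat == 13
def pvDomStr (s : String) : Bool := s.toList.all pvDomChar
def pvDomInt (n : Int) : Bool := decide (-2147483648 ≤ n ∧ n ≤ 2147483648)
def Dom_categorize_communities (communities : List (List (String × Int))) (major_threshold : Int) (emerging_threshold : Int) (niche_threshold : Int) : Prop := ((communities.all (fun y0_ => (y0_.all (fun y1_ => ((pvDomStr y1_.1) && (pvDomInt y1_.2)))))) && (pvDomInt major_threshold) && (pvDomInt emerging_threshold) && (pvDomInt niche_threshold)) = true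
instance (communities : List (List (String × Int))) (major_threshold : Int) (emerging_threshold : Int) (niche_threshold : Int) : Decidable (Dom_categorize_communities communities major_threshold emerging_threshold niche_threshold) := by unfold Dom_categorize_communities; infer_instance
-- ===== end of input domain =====

-- B replaces A's bucket-then-sort-each-bucket with one global stable descending sort
-- followed by a single bucketing pass (objective: alternative decomposition, same cost).

-- comm["paper_count"] / comm.get("paper_count", 0): under Pre_ the key is always
-- present, so both are the first value stored under "paper_count".
def pvKey (c : List (String × Int)) : Int := PySem.Dict.getD (PySem.Dict.mk c) "paper_count" 0

-- ===== PORT A =====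
def categorize_communities (communities : List (List (String × Int))) (major_threshold : Int) (emerging_threshold : Int) (niche_threshold : Int) : List (String × List (List (String × Int))) :=
  -- the for-loop appending each comm to one of the four category lists
  let cats := communities.foldl (fun s comm =>
      let pc := pvKey comm
      if pc ≥ major_threshold then (s.1 ++ [comm], s.2.1, s.2.2.1, s.2.2.2)
      else if pc ≥ emerging_threshold then (s.1, s.2.1 ++ [comm], s.2.2.1, s.2.2.2)
      else if pc ≥ niche_threshold then (s.1, s.2.1, s.2.2.1 ++ [comm], s.2.2.2)
      else (s.1, s.2.1, s.2.2.1, s.2.2.2 ++ [comm]))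
    (([], [], [], []) : List (List (String × Int)) × List (List (String × Int)) × List (List (String × Int)) × List (List (String × Int)))
  -- each category sorted by x["paper_count"], reverse=True (pvKey is exact under Pre_)
  [("major", PySem.List.sorted cats.1 pvKey true),
   ("emerging", PySem.List.sorted cats.2.1 pvKey true),
   ("niche", PySem.List.sorted cats.2.2.1 pvKey true),
   ("noise", PySem.List.sorted cats.2.2.2 pvKey true)]

-- ===== PORT B =====
-- B's single bucketing pass over the already-ordered list (append-at-end = cons
-- before the buckets of the rest of the traversal)
def pvFill (major_threshold emerging_threshold niche_threshold : Int) : List (List (String × Int)) → List (List (String × Int)) × List (List (String × Int)) × List (List (String × Int)) × List (List (String × Int))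
  | [] => ([], [], [], [])
  | comm :: rest =>
    let q := pvFill major_threshold emerging_threshold niche_threshold rest
    let pc := pvKey comm
    if pc ≥ major_threshold then (comm :: q.1, q.2.1, q.2.2.1, q.2.2.2)
    else if pc ≥ emerging_threshold then (q.1, comm :: q.2.1, q.2.2.1, q.2.2.2)
    else if pc ≥ niche_threshold then (q.1, q.2.1, comm :: q.2.2.1, q.2.2.2)
    else (q.1, q.2.1, q.2.2.1, comm :: q.2.2.2)

def categorize_communities_alt (communities : List (List (String × Int))) (major_threshold : Int) (emerging_threshold : Int) (niche_threshold : Int) : List (String × List (List (String × Int))) :=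
  -- ordered = sorted(communities, key=lambda x: x["paper_count"], reverse=True)
  let ordered := PySem.List.sorted communities pvKey true
  let q := pvFill major_threshold emerging_threshold niche_threshold ordered
  [("major", q.1), ("emerging", q.2.1), ("niche", q.2.2.1), ("noise", q.2.2.2)]

-- ===== PRECONDITION & SPEC =====
-- Pre_ excludes inputs where some community dict lacks the key "paper_count":
-- there A's (and B's) sort key x["paper_count"] raises KeyError.
def Pre_categorize_communities (communities : List (List (String × Int))) (major_threshold : Int) (emerging_threshold : Int) (niche_threshold : Int) : Prop :=
  ∀ c ∈ communities, (PySem.Dict.get? (PySem.Dict.mk c) "paper_count").isSome = true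
instance (communities : List (List (String × Int))) (major_threshold : Int) (emerging_threshold : Int) (niche_threshold : Int) : Decidable (Pre_categorize_communities communities major_threshold emerging_threshold niche_threshold) := by unfold Pre_categorize_communities; infer_instance

def pvWitness_categorize_communities : (List (List (String × Int))) × Int × Int × Int :=
  ([[("paper_count", 12)], [("paper_count", 4)], [("paper_count", 1)]], 10, 5, 3)

def Spec_categorize_communities (communities : List (List (String × Int))) (major_threshold : Int) (emerging_threshold : Int) (niche_threshold : Int) (out : List (String × List (List (String × Int)))) : Prop := out = categorize_communities_alt communities major_threshold emerging_threshold niche_threshold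
instance (communities : List (List (String × Int))) (major_threshold : Int) (emerging_threshold : Int) (niche_threshold : Int) (out : List (String × List (List (String × Int)))) : Decidable (Spec_categorize_communities communities major_threshold emerging_threshold niche_threshold out) := by unfold Spec_categorize_communities; infer_instance

-- ===== CLAIM (what is proved, stated in full; the proofs are below) =====
def Claim_equal_categorize_communities : Prop := ∀ (communities : List (List (String × Int))) (major_threshold : Int) (emerging_threshold : Int) (niche_threshold : Int), Dom_categorize_communities communities major_threshold emerging_threshold niche_threshold → Pre_categorize_communities communities major_threshold emerging_threshold niche_threshold → Spec_categorize_communities communities major_threshold emerging_threshold niche_threshold (categorize_communities communities major_threshold emerging_threshold niche_threshold)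

-- ===== LEMMAS AND PROOFS =====

-- the four bucket membership tests, as Boolean predicates on a community
def pvP1 (mt : Int) (c : List (String × Int)) : Bool := decide (pvKey c ≥ mt)
def pvP2 (mt et : Int) (c : List (String × Int)) : Bool := !decide (pvKey c ≥ mt) && decide (pvKey c ≥ et)
def pvP3 (mt et nt : Int) (c : List (String × Int)) : Bool := !decide (pvKey c ≥ mt) && !decide (pvKey c ≥ et) && decide (pvKey c ≥ nt)
def pvP4 (mt et nt : Int) (c : List (String × Int)) : Bool := !decide (pvKey c ≥ mt) && !decide (pvKey c ≥ et) && !decide (pvKey c ≥ nt)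

-- A's bucketing fold computes the four filters (appended to the accumulator)
theorem pvA_foldl_eq (mt et nt : Int) (xs : List (List (String × Int)))
    (a b c d : List (List (String × Int))) :
    xs.foldl (fun s comm =>
      let pc := pvKey comm
      if pc ≥ mt then (s.1 ++ [comm], s.2.1, s.2.2.1, s.2.2.2)
      else if pc ≥ et then (s.1, s.2.1 ++ [comm], s.2.2.1, s.2.2.2)
      else if pc ≥ nt then (s.1, s.2.1, s.2.2.1 ++ [comm], s.2.2.2)
      else (s.1, s.2.1, s.2.2.1, s.2.2.2 ++ [comm])) (a, b, c, d)
    = (a ++ xs.filter (pvP1 mt), b ++ xs.filter (pvP2 mt et),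
       c ++ xs.filter (pvP3 mt et nt), d ++ xs.filter (pvP4 mt et nt)) := by
  induction xs generalizing a b c d with
  | nil => simp
  | cons x t ih =>
    simp only [List.foldl_cons, List.filter_cons, pvP1, pvP2, pvP3, pvP4]
    by_cases h1 : pvKey x ≥ mt <;> by_cases h2 : pvKey x ≥ et <;>
      by_cases h3 : pvKey x ≥ nt <;>
      simp [h1, h2, h3, ih, List.append_assoc]

-- B's bucketing recursion computes the same four filters
theorem pvFill_eq (mt et nt : Int) (xs : List (List (String × Int))) :
    pvFill mt et nt xs
    = (xs.filter (pvP1 mt), xs.filter (pvP2 mt et),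
       xs.filter (pvP3 mt et nt), xs.filter (pvP4 mt et nt)) := by
  induction xs with
  | nil => simp [pvFill]
  | cons x t ih =>
    simp only [pvFill, List.filter_cons, pvP1, pvP2, pvP3, pvP4, ih]
    by_cases h1 : pvKey x ≥ mt <;> by_cases h2 : pvKey x ≥ et <;>
      by_cases h3 : pvKey x ≥ nt <;> simp [h1, h2, h3]

-- filtering commutes with a descending-sorted insertion, provided the target is
-- already descending in the key
theorem pv_filter_insertBy {α : Type} (key : α → Int) (p : α → Bool) (x : α)
    (l : List α) (hl : l.Pairwise (fun a b => key b ≤ key a)) :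
    (PySem.List.insertBy (fun a b => decide (key b < key a)) x l).filter p
    = if p x then PySem.List.insertBy (fun a b => decide (key b < key a)) x (l.filter p)
      else l.filter p := by
  induction l with
  | nil => simp [PySem.List.insertBy]; split <;> simp_all
  | cons y t ih =>
    have hy : ∀ z ∈ t, key z ≤ key y := fun z hz => List.rel_of_pairwise_cons hl hz
    have ht : t.Pairwise (fun a b => key b ≤ key a) := hl.of_cons
    by_cases hb : key y < key x
    · -- x inserted at the head
      have e1 : PySem.List.insertBy (fun a b => decide (key b < key a)) x (y :: t)
          = x :: y :: t := by simp [PySem.List.insertBy, hb]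
      rw [e1]
      by_cases hp : p x
      · -- x is kept; it also lands at the head of the filtered insertion
        have hall : ∀ z ∈ (y :: t).filter p, key z < key x := by
          intro z hz
          have hz' := List.mem_of_mem_filter hz
          rcases List.mem_cons.mp hz' with h | h
          · exact h ▸ hb
          · exact lt_of_le_of_lt (hy z h) hb
        cases hf : (y :: t).filter p with
        | nil => simp [hp, hf, PySem.List.insertBy]
        | cons z l'' =>
          have hzx : key z < key x := hall z (by rw [hf]; exact List.mem_cons_self)
          simp [hp, hf, PySem.List.insertBy, hzx]
      · simp [hp, List.filter_cons]
    · -- x goes past y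
      have e1 : PySem.List.insertBy (fun a b => decide (key b < key a)) x (y :: t)
          = y :: PySem.List.insertBy (fun a b => decide (key b < key a)) x t := by
        simp [PySem.List.insertBy, hb]
      rw [e1]
      by_cases hp : p y
      · simp only [List.filter_cons, hp, ih ht]
        by_cases hpx : p x
        · simp [hpx, PySem.List.insertBy, hb]
        · simp [hpx]
      · simp only [List.filter_cons, hp, ih ht]
        simp
  
-- filtering commutes with the stable descending sort
theorem pv_filter_sorted {α : Type} (key : α → Int) (p : α → Bool) (xs : List α) :
    (PySem.List.sorted xs key true).filter p
    = PySem.List.sorted (xs.filter p) key true := by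
  induction xs using List.reverseRecOn with
  | nil => simp [PySem.List.sorted]
  | append_singleton t x ih =>
    rw [PySem.List.sorted_rev_eq_foldl_insertBy, List.foldl_append, List.foldl_cons,
      List.foldl_nil, ← PySem.List.sorted_rev_eq_foldl_insertBy,
      pv_filter_insertBy key p x _ (PySem.List.sorted_pairwise_rev t key),
      List.filter_append]
    by_cases hp : p x
    · rw [ih]
      simp only [if_true, List.filter_cons, hp, List.filter_nil]
      rw [PySem.List.sorted_rev_eq_foldl_insertBy (t.filter p ++ [x]),
        List.foldl_append, List.foldl_cons, List.foldl_nil,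
        ← PySem.List.sorted_rev_eq_foldl_insertBy]
    · simp [hp, ih]

-- ===== VERDICT (by name: the statement is the Claim_ definition above) =====
theorem categorize_communities_spec : Claim_equal_categorize_communities := by
  intro communities mt et nt _ _
  unfold Spec_categorize_communities categorize_communities categorize_communities_alt
  simp only [pvA_foldl_eq, pvFill_eq, List.nil_append]
  rw [← pv_filter_sorted, ← pv_filter_sorted, ← pv_filter_sorted, ← pv_filter_sorted]
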